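-- pv_equiv track=rewrite | github.com/OkaDarmayasa/review | app.py | next_word_negation
-- ===== SOURCE A (Python) =====
-- def next_word_negation(text):
--     words = text.split()
--     negation_words = ['tidak', 'bukan', 'belum', 'tak', 'kurang']
--
--     new_words = []
--     skip_next = False
--     for i in range(len(words)):
--         if skip_next:
--             skip_next = False
--             continue
--         if words[i] in negation_words and i < len(words) - 1:
--             new_words.append(words[i] + "_" + words[i + 1])
--             skip_next = True
--         else:
--             new_words.append(words[i])
--
--     return ' '.join(new_words)
-- ===== SOURCE B (Python) =====
-- NEGATION_WORDS = ('tidak', 'bukan', 'belum', 'tak', 'kurang')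
--
--
-- def _merge(ws):
--     if not ws:
--         return []
--     if len(ws) >= 2 and ws[0] in NEGATION_WORDS:
--         return [ws[0] + '_' + ws[1]] + _merge(ws[2:])
--     return [ws[0]] + _merge(ws[1:])
--
--
-- def next_word_negation(text):
--     return ' '.join(_merge(text.split()))
-- ===== Notes on version B (the rewrite author's own statement) =====
-- stated objective: simpler
-- what changed: Replaces the index loop over range(len(words)) with its skip_next boolean flag and i<len-1 bound check by a direct structural recursion on the word list that consumes a negation word together with its successor in one step.
import Mathlib
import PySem

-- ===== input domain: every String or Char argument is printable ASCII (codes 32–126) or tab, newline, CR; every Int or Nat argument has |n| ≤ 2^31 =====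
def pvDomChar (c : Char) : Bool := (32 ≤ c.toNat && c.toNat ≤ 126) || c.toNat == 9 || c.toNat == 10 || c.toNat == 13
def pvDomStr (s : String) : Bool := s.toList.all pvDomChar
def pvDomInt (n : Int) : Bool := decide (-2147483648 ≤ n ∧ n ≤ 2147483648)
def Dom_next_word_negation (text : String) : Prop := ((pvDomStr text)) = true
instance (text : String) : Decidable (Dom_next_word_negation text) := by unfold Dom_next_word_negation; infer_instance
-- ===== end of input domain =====

-- ===== PORT A =====
-- B changes: structural recursion consuming negation+successor pairs instead of an index loop with a skip flag (objective: simpler).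
def pvNegationWords : List String := ["tidak", "bukan", "belum", "tak", "kurang"]

def next_word_negation (text : String) : String :=
  let words := PySem.Str.split₀ text
  let res :=
    (PySem.List.pyRange 0 (words.length : Int) 1).foldl
      (fun (st : List String × Bool) (i : Int) =>
        if st.2 then (st.1, false)
        else if pvNegationWords.contains (PySem.List.pyGetD words i "") && decide (i < (words.length : Int) - 1) then
          (st.1 ++ [PySem.List.pyGetD words i "" ++ "_" ++ PySem.List.pyGetD words (i + 1) ""], true)
        else (st.1 ++ [PySem.List.pyGetD words i ""], false))
      ([], false)
  PySem.Str.join " " res.1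

-- ===== PORT B =====
def pvMerge : List String → List String
  | [] => []
  | w :: nxt :: rest =>
      if pvNegationWords.contains w then (w ++ "_" ++ nxt) :: pvMerge rest
      else w :: pvMerge (nxt :: rest)
  | [w] => [w]

def next_word_negation_alt (text : String) : String :=
  PySem.Str.join " " (pvMerge (PySem.Str.split₀ text))

-- ===== PRECONDITION & SPEC =====
def Spec_next_word_negation (text : String) (out : String) : Prop := out = next_word_negation_alt text
instance (text : String) (out : String) : Decidable (Spec_next_word_negation text out) := by unfold Spec_next_word_negation; infer_instance

-- ===== CLAIM (what is proved, stated in full; the proofs are below) =====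
def Claim_equal_next_word_negation : Prop := ∀ (text : String), Dom_next_word_negation text → Spec_next_word_negation text (next_word_negation text)

-- ===== LEMMAS AND PROOFS =====


lemma pvLoop_eq (ws : List String) : ∀ fuel j acc, ws.length - j ≤ fuel → j ≤ ws.length →
    ((PySem.List.pyRange (j : Int) (ws.length : Int) 1).foldl
      (fun (st : List String × Bool) (i : Int) =>
        if st.2 then (st.1, false)
        else if pvNegationWords.contains (PySem.List.pyGetD ws i "") && decide (i < (ws.length : Int) - 1) then
          (st.1 ++ [PySem.List.pyGetD ws i "" ++ "_" ++ PySem.List.pyGetD ws (i + 1) ""], true)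
        else (st.1 ++ [PySem.List.pyGetD ws i ""], false))
      (acc, false)) = (acc ++ pvMerge (ws.drop j), false) := by
  intro fuel
  induction fuel with
  | zero =>
    intro j acc hf hj
    have hje : j = ws.length := by omega
    subst hje
    rw [PySem.List.pyRange_one_eq_nil (by omega)]
    simp [pvMerge]
  | succ n ih =>
    intro j acc hf hj
    by_cases hje : j = ws.length
    · subst hje
      rw [PySem.List.pyRange_one_eq_nil (by omega)]
      simp [pvMerge]
    · have hlt : j < ws.length := by omega
      have hdropj : ws.drop j = ws[j] :: ws.drop (j + 1) := List.drop_eq_getElem_cons hlt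
      rw [PySem.List.pyRange_one_cons (by exact_mod_cast hlt)]
      simp only [List.foldl_cons, Bool.false_eq_true, if_false]
      by_cases hneg : (pvNegationWords.contains (PySem.List.pyGetD ws (j : Int) "") && decide ((j : Int) < (ws.length : Int) - 1)) = true
      · rw [if_pos hneg]
        have hlt1 : j + 1 < ws.length := by
          have := (Bool.and_eq_true ..).mp hneg |>.2
          have := of_decide_eq_true this
          omega
        have hdropj1 : ws.drop (j + 1) = ws[j + 1] :: ws.drop (j + 2) := List.drop_eq_getElem_cons hlt1
        rw [PySem.List.pyRange_one_cons (by exact_mod_cast hlt1)]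
        simp only [List.foldl_cons, if_true]
        have hcast : (j : Int) + 1 + 1 = ((j + 2 : Nat) : Int) := by push_cast; ring
        rw [hcast, ih (j + 2) _ (by omega) (by omega)]
        have hmem : pvNegationWords.contains ws[j] = true := by
          have := (Bool.and_eq_true ..).mp hneg |>.1
          rwa [PySem.List.pyGetD_ofNat ws j "" hlt] at this
        have hcast1 : (j : Int) + 1 = ((j + 1 : Nat) : Int) := by push_cast; ring
        rw [hdropj, hdropj1, PySem.List.pyGetD_ofNat ws j "" hlt, hcast1,
          PySem.List.pyGetD_ofNat ws (j+1) "" hlt1]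
        simp [pvMerge, (List.contains_iff_mem ..).mp hmem]
      · rw [if_neg hneg]
        have hcast : (j : Int) + 1 = ((j + 1 : Nat) : Int) := by push_cast; ring
        rw [hcast, ih (j + 1) _ (by omega) (by omega)]
        have hget : PySem.List.pyGetD ws (j : Int) "" = ws[j] := PySem.List.pyGetD_ofNat ws j "" hlt
        rw [hdropj]
        rcases hd1 : ws.drop (j + 1) with _ | ⟨nxt, rest⟩
        · simp [pvMerge, hget]
        · have hmem : pvNegationWords.contains ws[j] = false := by
            by_contra hcon
            have hj1 : j + 1 < ws.length := by
              by_contra hcon2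
              rw [List.drop_eq_nil_iff.mpr (by omega)] at hd1; simp at hd1
            apply hneg
            rw [Bool.and_eq_true]
            exact ⟨by rw [hget]; simpa using hcon, by simp; omega⟩
          have hmem' : ws[j] ∉ pvNegationWords := by simpa using hmem
          simp [pvMerge, hmem', hget]

theorem next_word_negation_spec : Claim_equal_next_word_negation := by
  intro text _
  unfold Spec_next_word_negation next_word_negation next_word_negation_alt
  have h := pvLoop_eq (PySem.Str.split₀ text) (PySem.Str.split₀ text).length 0 [] (by omega) (by omega)
  simp only [Nat.cast_zero] at h
  dsimp only
  rw [h]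
  simp
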